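-- pv_equiv track=rewrite | github.com/delaila5888749dhah/lush-worker-selector-devlush | modules/rollout/main.py | _build_scale_steps
-- ===== SOURCE A (Python) =====
-- _DEFAULT_SCALE_STEPS = (1, 3, 5, 10)
--
-- _DEFAULT_MAX_WORKER_COUNT = 10
--
-- _DECADE_MULTIPLIERS = (2, 5, 10)
--
-- def _build_scale_steps(max_count):
--     """Build the scaling-step tuple for a given maximum worker count.
--
--     ``max_count`` is the operator-configured true upper bound.  The returned
--     tuple always progresses strictly upward and always ends with exactly
--     ``max_count``.  For ``max_count`` in ``1..10`` the canonical default
--     steps ``(1, 3, 5, 10)`` are filtered to values strictly below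
--     ``max_count`` before the cap is appended — so ``1 → (1,)``,
--     ``2 → (1, 2)``, ``4 → (1, 3, 4)``, ``7 → (1, 3, 5, 7)``, and
--     ``10 → (1, 3, 5, 10)``.  For ``max_count > 10`` the canonical
--     ``(1, 3, 5, 10)`` prefix is kept and extended with a 2/5/10 decade
--     progression (``20, 50, 100, 200, 500, …``) up to — but not including —
--     ``max_count``, which is then appended as the final step.
--     """
--     if max_count <= 1:
--         return (1,)
--     steps = [value for value in _DEFAULT_SCALE_STEPS if value < max_count]
--     if max_count > _DEFAULT_MAX_WORKER_COUNT:
--         decade = 10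
--         # Guard against pathological inputs: the progression grows by 10× each
--         # outer iteration, so 20 iterations already reaches 10**21.
--         for _ in range(20):
--             appended_any = False
--             reached_cap = False
--             for multiplier in _DECADE_MULTIPLIERS:
--                 value = decade * multiplier
--                 if value >= max_count:
--                     reached_cap = True
--                     break
--                 steps.append(value)
--                 appended_any = True
--             if reached_cap or not appended_any:
--                 break
--             decade *= 10
--     steps.append(max_count)
--     return tuple(steps)
-- ===== SOURCE B (Python) =====
-- _DEFAULT_SCALE_STEPS = (1, 3, 5, 10)
--
-- _DEFAULT_MAX_WORKER_COUNT = 10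
--
-- _DECADE_MULTIPLIERS = (2, 5, 10)
--
-- _CANDIDATES = _DEFAULT_SCALE_STEPS + tuple(
--     10 ** e * m for e in range(1, 21) for m in _DECADE_MULTIPLIERS
-- )
--
--
-- def _build_scale_steps(max_count):
--     if max_count <= 1:
--         return (1,)
--     steps = [c for c in _CANDIDATES if c < max_count]
--     steps.append(max_count)
--     return tuple(steps)
-- ===== Notes on version B (the rewrite author's own statement) =====
-- stated objective: simpler
-- what changed: Replaces A's stateful bounded decade loop with break flags and a mutable decade by one precomputed monotone candidate sequence (the defaults plus the full 2/5/10 decade progression A can ever reach) filtered once with '< max_count' and capped with max_count.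
import Mathlib
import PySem

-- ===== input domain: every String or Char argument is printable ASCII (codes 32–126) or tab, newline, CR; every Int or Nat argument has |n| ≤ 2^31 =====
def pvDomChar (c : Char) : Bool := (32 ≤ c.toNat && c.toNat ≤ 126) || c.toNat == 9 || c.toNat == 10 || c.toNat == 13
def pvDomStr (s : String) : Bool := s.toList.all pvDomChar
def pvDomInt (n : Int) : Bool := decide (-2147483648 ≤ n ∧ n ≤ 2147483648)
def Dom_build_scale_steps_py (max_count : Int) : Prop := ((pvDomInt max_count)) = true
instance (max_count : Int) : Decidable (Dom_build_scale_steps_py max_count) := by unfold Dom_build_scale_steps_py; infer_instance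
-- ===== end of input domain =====

-- B replaces A's stateful 20-iteration decade loop (break flags, mutable decade) by a single
-- filter over one precomputed monotone candidate list; objective: simpler.

-- ===== PORT A =====
-- inner `for multiplier in (2,5,10)` loop: returns (steps, appended_any, reached_cap)
def pvInnerA (max_count decade : Int) : List Int → Bool → List Int → List Int × Bool × Bool
  | steps, appended_any, [] => (steps, appended_any, false)
  | steps, appended_any, m :: ms =>
    let value := decade * m
    if value ≥ max_count then (steps, appended_any, true)
    else pvInnerA max_count decade (steps ++ [value]) true ms

-- outer `for _ in range(20)` loop with its break condition
def pvOuterA (max_count : Int) : Nat → Int → List Int → List Int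
  | 0, _, steps => steps
  | Nat.succ n, decade, steps =>
    let r := pvInnerA max_count decade steps false [2, 5, 10]
    if r.2.2 || !r.2.1 then r.1
    else pvOuterA max_count n (decade * 10) r.1

def build_scale_steps_py (max_count : Int) : List Int :=
  if max_count ≤ 1 then [1]
  else
    let steps := [1, 3, 5, 10].filter (fun value => decide (value < max_count))
    let steps := if max_count > 10 then pvOuterA max_count 20 10 steps else steps
    steps ++ [max_count]

-- ===== PORT B =====
def pvCandidates : List Int :=
  [1, 3, 5, 10] ++ (PySem.List.pyRange 1 21 1).flatMap (fun e => [2, 5, 10].map (fun m => 10 ^ e.toNat * m))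

def build_scale_steps_py_alt (max_count : Int) : List Int :=
  if max_count ≤ 1 then [1]
  else (pvCandidates.filter (fun c => decide (c < max_count))) ++ [max_count]

-- ===== PRECONDITION & SPEC =====
def Spec_build_scale_steps_py (max_count : Int) (out : List Int) : Prop := out = build_scale_steps_py_alt max_count
instance (max_count : Int) (out : List Int) : Decidable (Spec_build_scale_steps_py max_count out) := by unfold Spec_build_scale_steps_py; infer_instance

-- ===== CLAIM (what is proved, stated in full; the proofs are below) =====
def Claim_equal_build_scale_steps_py : Prop := ∀ (max_count : Int), Dom_build_scale_steps_py max_count → Spec_build_scale_steps_py max_count (build_scale_steps_py max_count)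

-- ===== LEMMAS AND PROOFS =====

-- the decade-progression values starting at decade d, for n decades
def decCands (d : Int) : Nat → List Int
  | 0 => []
  | n + 1 => [2 * d, 5 * d, 10 * d] ++ decCands (10 * d) n

theorem decCands_ge {d : Int} (hd : 0 < d) : ∀ (n : Nat), ∀ x ∈ decCands d n, 2 * d ≤ x := by
  intro n
  induction n generalizing d with
  | zero => intro x hx; simp [decCands] at hx
  | succ n ih =>
    intro x hx
    simp only [decCands, List.mem_append, List.mem_cons, List.not_mem_nil, or_false] at hx
    rcases hx with (h | h | h) | h
    · omega
    · omega
    · omega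
    · have := ih (d := 10 * d) (by omega) x h
      omega

theorem filter_decCands_nil {d mc : Int} (hd : 0 < d) (hcap : mc ≤ 2 * d) (n : Nat) :
    (decCands d n).filter (fun x => decide (x < mc)) = [] := by
  rw [List.filter_eq_nil_iff]
  intro x hx
  have := decCands_ge hd n x hx
  simp only [decide_eq_true_eq]
  omega

theorem outerA_eq_filter (mc : Int) : ∀ (n : Nat) (d : Int) (steps : List Int), 0 < d →
    pvOuterA mc n d steps = steps ++ (decCands d n).filter (fun x => decide (x < mc)) := by
  intro n
  induction n with
  | zero => intro d steps hd; simp [pvOuterA, decCands]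
  | succ n ih =>
    intro d steps hd
    simp only [pvOuterA, pvInnerA, decCands]
    by_cases h2 : d * 2 ≥ mc
    · rw [if_pos h2]
      simp only [Bool.true_or, if_true]
      rw [List.filter_append, filter_decCands_nil (by omega) (by omega) n]
      simp only [List.filter]
      rw [decide_eq_false (by omega), decide_eq_false (by omega), decide_eq_false (by omega)]
      simp
    · rw [if_neg h2]
      by_cases h5 : d * 5 ≥ mc
      · rw [if_pos h5]
        simp only [Bool.true_or, if_true]
        rw [List.filter_append, filter_decCands_nil (by omega) (by omega) n]
        simp only [List.filter]
        rw [decide_eq_true (by omega : (2 * d < mc)), decide_eq_false (by omega),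
          decide_eq_false (by omega)]
        simp only [List.append_nil]
        have : d * 2 = 2 * d := by ring
        simp [this]
      · rw [if_neg h5]
        by_cases h10 : d * 10 ≥ mc
        · rw [if_pos h10]
          simp only [Bool.true_or, if_true]
          rw [List.filter_append, filter_decCands_nil (by omega) (by omega) n]
          simp only [List.filter]
          rw [decide_eq_true (by omega : (2 * d < mc)), decide_eq_true (by omega : (5 * d < mc)),
            decide_eq_false (by omega)]
          simp only [List.append_nil]
          have e2 : d * 2 = 2 * d := by ring
          have e5 : d * 5 = 5 * d := by ring
          rw [e2, e5]
          simp
        · rw [if_neg h10]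
          simp only [Bool.or_self, Bool.not_true, if_neg (by decide : ¬ (false = true))]
          rw [show d * 10 = 10 * d from by ring, ih (10 * d) _ (by omega), List.filter_append]
          simp only [List.filter]
          rw [decide_eq_true (by omega : (2 * d < mc)), decide_eq_true (by omega : (5 * d < mc)),
            decide_eq_true (by omega : (10 * d < mc))]
          simp [mul_comm]

theorem candidates_split : pvCandidates = [1, 3, 5, 10] ++ decCands 10 20 := by decide

theorem build_scale_steps_py_spec' (mc : Int) :
    build_scale_steps_py mc = build_scale_steps_py_alt mc := by
  unfold build_scale_steps_py build_scale_steps_py_alt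
  by_cases h1 : mc ≤ 1
  · rw [if_pos h1, if_pos h1]
  · rw [if_neg h1, if_neg h1, candidates_split, List.filter_append]
    dsimp only
    by_cases h10 : mc > 10
    · rw [if_pos h10, outerA_eq_filter mc 20 10 _ (by omega)]
    · rw [if_neg h10, filter_decCands_nil (by omega) (by omega) 20, List.append_nil]

-- ===== VERDICT (by name: the statement is the Claim_ definition above) =====
theorem build_scale_steps_py_spec : Claim_equal_build_scale_steps_py := by
  intro mc _
  exact build_scale_steps_py_spec' mc
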